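-- pv_equiv track=rewrite | github.com/otso-dev/programming-language | Python/python_apply/Day_13/Day13_prob_dist.py | count_with_replacement_order
-- ===== SOURCE A (Python) =====
-- def count_with_replacement_order(pool, sel_count):  # all
--     if sel_count == 1:
--         return len(pool), [[x] for x in pool]
--     a, b = count_with_replacement_order(pool, sel_count-1)
--     r = []
--     for x in pool:
--         for b_i in b:
--             r.append(b_i+[x])
--     return len(r), r
-- ===== SOURCE B (Python) =====
-- def count_with_replacement_order(pool, sel_count):
--     r = [[x] for x in pool]
--     for _ in range(sel_count - 1):
--         r = [b_i + [x] for x in pool for b_i in r]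
--     return len(r), r
-- ===== Notes on version B (the rewrite author's own statement) =====
-- stated objective: simpler
-- what changed: Replaces the linear recursion on sel_count with an iterative accumulator loop building the tuples bottom-up.
import Mathlib
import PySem

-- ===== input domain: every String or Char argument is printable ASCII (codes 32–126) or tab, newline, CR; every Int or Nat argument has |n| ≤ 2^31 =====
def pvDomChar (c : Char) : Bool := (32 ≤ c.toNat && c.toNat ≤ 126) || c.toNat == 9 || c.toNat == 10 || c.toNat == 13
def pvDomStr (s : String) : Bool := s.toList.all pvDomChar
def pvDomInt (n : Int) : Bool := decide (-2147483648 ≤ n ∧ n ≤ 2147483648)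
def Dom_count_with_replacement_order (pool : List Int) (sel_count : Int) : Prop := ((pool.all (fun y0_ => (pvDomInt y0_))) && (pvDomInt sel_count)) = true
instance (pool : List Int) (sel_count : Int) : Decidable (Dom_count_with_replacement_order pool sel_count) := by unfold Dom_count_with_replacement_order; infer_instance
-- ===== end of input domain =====

-- B replaces A's linear recursion on sel_count by an iterative accumulator loop (same cost, simpler).

-- ===== PORT A =====
-- A's recursion on sel_count, transliterated on sel_count.toNat (Python raises RecursionError
-- for sel_count ≤ 0, which Pre_ excludes; the Nat-0 case is unreachable under Pre_).
def cwroA (pool : List Int) : Nat → Int × List (List Int)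
  | 0 => (0, [])
  | 1 => ((pool.length : Int), pool.map (fun x => [x]))
  | (n+2) =>
    let ab := cwroA pool (n+1)
    let b := ab.2
    let r := pool.foldl (fun r x => b.foldl (fun r b_i => r ++ [b_i ++ [x]]) r) []
    ((r.length : Int), r)

def count_with_replacement_order (pool : List Int) (sel_count : Int) : Int × List (List Int) :=
  cwroA pool sel_count.toNat

-- ===== PORT B =====
def count_with_replacement_order_alt (pool : List Int) (sel_count : Int) : Int × List (List Int) :=
  let r0 := pool.map (fun x => [x])
  let r := (PySem.List.pyRange 0 (sel_count - 1) 1).foldl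
    (fun r _ => pool.flatMap (fun x => r.map (fun b_i => b_i ++ [x]))) r0
  ((r.length : Int), r)

-- ===== PRECONDITION & SPEC =====
-- Python A recurses forever (RecursionError) for sel_count ≤ 0; Pre_ excludes exactly those inputs.
def Pre_count_with_replacement_order (pool : List Int) (sel_count : Int) : Prop := 1 ≤ sel_count
instance (pool : List Int) (sel_count : Int) : Decidable (Pre_count_with_replacement_order pool sel_count) := by unfold Pre_count_with_replacement_order; infer_instance
def pvWitness_count_with_replacement_order : List Int × Int := ([1, 2], 2)

def Spec_count_with_replacement_order (pool : List Int) (sel_count : Int) (out : Int × List (List Int)) : Prop := out = count_with_replacement_order_alt pool sel_count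
instance (pool : List Int) (sel_count : Int) (out : Int × List (List Int)) : Decidable (Spec_count_with_replacement_order pool sel_count out) := by unfold Spec_count_with_replacement_order; infer_instance

-- ===== CLAIM (what is proved, stated in full; the proofs are below) =====
def Claim_equal_count_with_replacement_order : Prop := ∀ (pool : List Int) (sel_count : Int), Dom_count_with_replacement_order pool sel_count → Pre_count_with_replacement_order pool sel_count → Spec_count_with_replacement_order pool sel_count (count_with_replacement_order pool sel_count)

-- ===== LEMMAS AND PROOFS =====

-- the one step both programs perform: append every pool element to every tuple so far
def cwroStep (pool : List Int) (b : List (List Int)) : List (List Int) :=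
  pool.flatMap (fun x => b.map (fun b_i => b_i ++ [x]))

-- A's nested append-loop computes cwroStep
lemma foldlA_eq_step (b : List (List Int)) :
    ∀ (pool : List Int) (acc : List (List Int)),
      pool.foldl (fun r x => b.foldl (fun r b_i => r ++ [b_i ++ [x]]) r) acc = acc ++ cwroStep pool b
  | [], acc => by simp [cwroStep]
  | y :: ys, acc => by
    rw [List.foldl_cons, foldlA_eq_step b ys, PySem.List.foldl_append_singleton_eq_map]
    simp [cwroStep]

-- B's pyRange fold iterates cwroStep (sel_count - 1).toNat = n times
lemma foldlB_eq_iterate (pool : List Int) (n : Nat) (init : List (List Int)) :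
    (PySem.List.pyRange 0 (n : Int) 1).foldl (fun r _ => cwroStep pool r) init
      = (cwroStep pool)^[n] init := by
  induction n generalizing init with
  | zero => simp
  | succ m ih =>
    rw [show ((m + 1 : Nat) : Int) = (m : Int) + 1 by push_cast; ring,
        PySem.List.pyRange_one_succ_right (by positivity)]
    simp [List.foldl_append, ih, ← Function.iterate_succ_apply', Function.iterate_succ_apply]

-- A's Nat-recursion also iterates cwroStep (second component)
lemma cwroA_snd (pool : List Int) (n : Nat) :
    (cwroA pool (n+1)).2 = (cwroStep pool)^[n] (pool.map (fun x => [x])) := by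
  induction n with
  | zero => simp [cwroA]
  | succ m ih =>
    rw [Function.iterate_succ_apply', ← ih]
    show (pool.foldl (fun r x => ((cwroA pool (m+1)).2).foldl (fun r b_i => r ++ [b_i ++ [x]]) r) []) = _
    rw [foldlA_eq_step _ pool []]; rfl

lemma cwroA_fst (pool : List Int) (n : Nat) :
    (cwroA pool (n+1)).1 = ((cwroA pool (n+1)).2.length : Int) := by
  cases n <;> simp [cwroA]

-- ===== VERDICT (by name: the statement is the Claim_ definition above) =====
theorem count_with_replacement_order_spec : Claim_equal_count_with_replacement_order := by
  intro pool sel_count _ hpre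
  unfold Spec_count_with_replacement_order count_with_replacement_order count_with_replacement_order_alt
  obtain ⟨n, hn⟩ : ∃ n : Nat, sel_count.toNat = n + 1 :=
    ⟨sel_count.toNat - 1, by have h1 : 1 ≤ sel_count := hpre; omega⟩
  have h1 : 1 ≤ sel_count := hpre
  have hsel : sel_count - 1 = (n : Int) := by omega
  rw [hn, hsel]
  have hB : (PySem.List.pyRange 0 (n : Int) 1).foldl
      (fun r _ => pool.flatMap (fun x => r.map (fun b_i => b_i ++ [x]))) (pool.map (fun x => [x]))
      = (cwroStep pool)^[n] (pool.map (fun x => [x])) := by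
    simpa [cwroStep] using foldlB_eq_iterate pool n (pool.map (fun x => [x]))
  have := cwroA_snd pool n
  have hf := cwroA_fst pool n
  refine Prod.ext ?_ ?_ <;> simp [hB, hf, this]
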